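-- pv_equiv track=rewrite | github.com/jackychang16/sc-projects | StanCode_Projects/hangman_game/caesar.py | build_new_alphabet
-- ===== SOURCE A (Python) =====
-- ALPHABET = 'ABCDEFGHIJKLMNOPQRSTUVWXYZ'
--
-- def build_new_alphabet(n):
--     new_alphabet = ''
--     for i in range(26):
--         '''
--         The ALPHABET has 26 letters.
--         The program should create from the last letter
--         to the first letter in the new ALPHABET.
--         '''
--         new = ALPHABET[(i - n +26) % 26]
--         new_alphabet = new_alphabet + new
--     return new_alphabet
-- ===== SOURCE B (Python) =====
-- ALPHABET = 'ABCDEFGHIJKLMNOPQRSTUVWXYZ'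
--
-- def build_new_alphabet(n):
--     k = (-n) % 26
--     return ALPHABET[k:] + ALPHABET[:k]
-- ===== Notes on version B (the rewrite author's own statement) =====
-- stated objective: idiomatic
-- what changed: Replaces the per-letter index-and-concatenate loop with a closed-form rotation: compute the offset (-n) mod the alphabet length once and return the concatenation of the two slices of the fixed alphabet.
import Mathlib
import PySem

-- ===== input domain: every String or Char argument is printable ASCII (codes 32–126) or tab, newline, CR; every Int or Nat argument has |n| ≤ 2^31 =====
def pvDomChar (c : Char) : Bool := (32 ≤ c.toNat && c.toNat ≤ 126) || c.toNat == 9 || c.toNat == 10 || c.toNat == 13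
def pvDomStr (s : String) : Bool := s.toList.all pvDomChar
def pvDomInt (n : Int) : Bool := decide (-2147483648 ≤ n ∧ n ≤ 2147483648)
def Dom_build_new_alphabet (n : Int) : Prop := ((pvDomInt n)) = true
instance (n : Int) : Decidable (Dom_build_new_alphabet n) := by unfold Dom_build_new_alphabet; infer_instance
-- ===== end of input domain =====

-- B replaces A's 26-step character-by-character build with a closed-form rotation (two slices); same value for every n.

-- The module constant ALPHABET, as a list of characters (string facts are proved on the list side).
def pvALPH : List Char := "ABCDEFGHIJKLMNOPQRSTUVWXYZ".toList

-- ===== PORT A =====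
-- for i in range(26): new_alphabet += ALPHABET[(i - n + 26) % 26]
-- The index (i - n + 26) % 26 is always in [0, 26), so Python's indexing never raises;
-- pyGetD's default 'A' is never used.
def build_new_alphabet (n : Int) : String :=
  String.ofList ((PySem.List.pyRange 0 26 1).foldl
    (fun acc i => acc ++ [PySem.List.pyGetD pvALPH (PySem.Int.mod (i - n + 26) 26) 'A']) [])

-- ===== PORT B =====
-- k = (-n) % 26; return ALPHABET[k:] + ALPHABET[:k]
def build_new_alphabet_alt (n : Int) : String :=
  let k := PySem.Int.mod (-n) 26
  String.ofList (PySem.List.slice pvALPH (some k) none ++ PySem.List.slice pvALPH none (some k))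

-- ===== PRECONDITION & SPEC =====
def Spec_build_new_alphabet (n : Int) (out : String) : Prop := out = build_new_alphabet_alt n
instance (n : Int) (out : String) : Decidable (Spec_build_new_alphabet n out) := by unfold Spec_build_new_alphabet; infer_instance

-- ===== CLAIM (what is proved, stated in full; the proofs are below) =====
def Claim_equal_build_new_alphabet : Prop := ∀ (n : Int), Dom_build_new_alphabet n → Spec_build_new_alphabet n (build_new_alphabet n)

-- ===== LEMMAS AND PROOFS =====

-- A's value depends only on n mod 26.
theorem pv_A_periodic (n : Int) : build_new_alphabet n = build_new_alphabet (n % 26) := by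
  unfold build_new_alphabet
  have h : (fun (acc : List Char) (i : Int) =>
      acc ++ [PySem.List.pyGetD pvALPH (PySem.Int.mod (i - n + 26) 26) 'A'])
      = (fun acc i => acc ++ [PySem.List.pyGetD pvALPH (PySem.Int.mod (i - n % 26 + 26) 26) 'A']) := by
    funext acc i
    rw [PySem.Int.mod_eq_emod_of_pos (by norm_num : (0:Int) < 26), PySem.Int.mod_eq_emod_of_pos (by norm_num : (0:Int) < 26)]
    have : (i - n + 26) % 26 = (i - n % 26 + 26) % 26 := by omega
    rw [this]
  rw [h]

-- B's value depends only on n mod 26.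
theorem pv_B_periodic (n : Int) : build_new_alphabet_alt n = build_new_alphabet_alt (n % 26) := by
  unfold build_new_alphabet_alt
  rw [PySem.Int.mod_eq_emod_of_pos (by norm_num : (0:Int) < 26), PySem.Int.mod_eq_emod_of_pos (by norm_num : (0:Int) < 26)]
  have : (-n) % 26 = (-(n % 26)) % 26 := by omega
  rw [this]

-- The 26 residue cases, by computation.
theorem pv_fin_cases : ∀ m : Fin 26, build_new_alphabet (m.val : Int) = build_new_alphabet_alt (m.val : Int) := by
  decide

-- ===== VERDICT (by name: the statement is the Claim_ definition above) =====
theorem build_new_alphabet_spec : Claim_equal_build_new_alphabet := by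
  intro n _
  unfold Spec_build_new_alphabet
  rw [pv_A_periodic, pv_B_periodic]
  have h0 : 0 ≤ n % 26 := Int.emod_nonneg n (by norm_num)
  have h1 : n % 26 < 26 := Int.emod_lt_of_pos n (by norm_num)
  have := pv_fin_cases ⟨(n % 26).toNat, by omega⟩
  simpa [Int.toNat_of_nonneg h0] using this
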